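-- pv_equiv track=rewrite | github.com/madellimac/hw-aff3ct | Python/encoder.py | add_frozen_in_data
-- ===== SOURCE A (Python) =====
-- def add_frozen_in_data(data_in, frozen_bits):
--     """The frozen bits contains the position where zeros will be add to the data
--     in.
--     This function add the zeros at the right position in the data in
--
--     Args:
--         frozen_bits (array): The frozen bits
--
--     Returns:
--         array: the new data bits with the frozen bits added.
--     """
--     n = len(frozen_bits)
--     out = [0]*n
--     compteur = 0
--
--     for i in range(n):
--         if(frozen_bits[i] == 1):
--             out[i] = 0
--         else:
--             out[i] = data_in[compteur]
--             compteur = compteur + 1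
--
--     return out
-- ===== SOURCE B (Python) =====
-- def add_frozen_in_data(data_in, frozen_bits):
--     stack = data_in[::-1]
--     return [0 if f == 1 else stack.pop() for f in frozen_bits]
-- ===== Notes on version B (the rewrite author's own statement) =====
-- stated objective: alternative
-- what changed: Replaces A's preallocated output array filled by an indexed loop threading a data counter with a stack discipline: reverse data_in once into a stack and emit the result as a comprehension over frozen_bits that pops the next data bit off the stack, so there is no counter, no index arithmetic and no in-place writes.
import Mathlib
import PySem

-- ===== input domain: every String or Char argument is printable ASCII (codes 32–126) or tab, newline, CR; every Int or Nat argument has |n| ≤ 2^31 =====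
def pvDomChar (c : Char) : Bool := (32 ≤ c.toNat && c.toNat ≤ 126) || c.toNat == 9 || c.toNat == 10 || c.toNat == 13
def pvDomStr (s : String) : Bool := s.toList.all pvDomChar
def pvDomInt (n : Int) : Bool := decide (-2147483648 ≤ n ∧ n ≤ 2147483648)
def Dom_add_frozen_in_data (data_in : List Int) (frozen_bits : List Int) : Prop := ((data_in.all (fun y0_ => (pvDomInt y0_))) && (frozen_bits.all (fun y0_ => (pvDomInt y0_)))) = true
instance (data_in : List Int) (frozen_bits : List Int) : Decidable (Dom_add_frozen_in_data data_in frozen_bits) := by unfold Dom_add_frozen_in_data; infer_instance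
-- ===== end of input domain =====

-- B replaces A's counter-indexed fill of a preallocated array by a stack discipline:
-- reverse data_in once, then emit the output as a comprehension popping the stack.
-- ===== PORT A =====
def add_frozen_in_data (data_in : List Int) (frozen_bits : List Int) : List Int :=
  let n : Int := PySem.List.len frozen_bits
  let out : List Int := List.replicate n.toNat 0
  let compteur : Int := 0
  let s := (PySem.List.pyRange 0 n 1).foldl
    (fun (s : List Int × Int) i =>
      if PySem.List.pyGetD frozen_bits i 0 == 1 then
        (PySem.List.pySetD s.1 i 0, s.2)
      else
        (PySem.List.pySetD s.1 i (PySem.List.pyGetD data_in s.2 0), s.2 + 1))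
    (out, compteur)
  s.1

-- ===== PORT B =====
def add_frozen_in_data_alt (data_in : List Int) (frozen_bits : List Int) : List Int :=
  let stack : List Int := (PySem.List.slice? data_in none none (-1)).getD []  -- data_in[::-1]; step -1 never fails
  (frozen_bits.foldl
    (fun (s : List Int × List Int) (f : Int) =>
      if f == 1 then (s.1 ++ [(0 : Int)], s.2)
      else match PySem.List.pop? s.2 (-1) with   -- stack.pop()
        | some (v, rest) => (s.1 ++ [v], rest)
        | none => (s.1 ++ [(0 : Int)], s.2))     -- Python raises IndexError here; Pre_ excludes these inputs
    ([], stack)).1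

-- ===== PRECONDITION & SPEC =====
-- Pre_ excludes exactly the inputs where Python A raises IndexError: frozen_bits asks for
-- more data bits than data_in provides (B's Python raises IndexError on the same inputs).
def Pre_add_frozen_in_data (data_in : List Int) (frozen_bits : List Int) : Prop :=
  frozen_bits.countP (fun b => b != 1) <= data_in.length
instance (data_in : List Int) (frozen_bits : List Int) : Decidable (Pre_add_frozen_in_data data_in frozen_bits) := by unfold Pre_add_frozen_in_data; infer_instance

def pvWitness_add_frozen_in_data : List Int × List Int := ([5, 7], [1, 0, 1, 0])

def Spec_add_frozen_in_data (data_in : List Int) (frozen_bits : List Int) (out : List Int) : Prop := out = add_frozen_in_data_alt data_in frozen_bits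
instance (data_in : List Int) (frozen_bits : List Int) (out : List Int) : Decidable (Spec_add_frozen_in_data data_in frozen_bits out) := by unfold Spec_add_frozen_in_data; infer_instance

-- ===== CLAIM (what is proved, stated in full; the proofs are below) =====
def Claim_equal_add_frozen_in_data : Prop := ∀ (data_in : List Int) (frozen_bits : List Int), Dom_add_frozen_in_data data_in frozen_bits → Pre_add_frozen_in_data data_in frozen_bits → Spec_add_frozen_in_data data_in frozen_bits (add_frozen_in_data data_in frozen_bits)

-- ===== LEMMAS AND PROOFS =====

-- Common value of both programs: walk frozen_bits with a data index k.
def pvInterleave (data : List Int) (k : Int) : List Int → List Int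
  | [] => []
  | b :: fs => if b = 1 then 0 :: pvInterleave data k fs
               else PySem.List.pyGetD data k 0 :: pvInterleave data (k + 1) fs

lemma pvDrop_head (F fs : List Int) (b : Int) (a : Nat)
    (h : F.drop a = b :: fs) : F.getD a 0 = b := by
  have h0 := congrArg (fun l => l[0]?) h
  simp at h0
  simp [List.getD, h0]

lemma pvDrop_tail (F fs : List Int) (b : Int) (a : Nat)
    (h : F.drop a = b :: fs) : F.drop (a + 1) = fs := by
  have := congrArg List.tail h
  simpa [List.tail_drop] using this

lemma pvLoopA (data F : List Int) : ∀ (fs pre : List Int) (k : Int),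
    F.drop pre.length = fs → pre.length + fs.length = F.length →
    ((PySem.List.pyRange (pre.length : Int) (F.length : Int) 1).foldl
      (fun (s : List Int × Int) i =>
        if PySem.List.pyGetD F i 0 == 1 then
          (PySem.List.pySetD s.1 i 0, s.2)
        else
          (PySem.List.pySetD s.1 i (PySem.List.pyGetD data s.2 0), s.2 + 1))
      (pre ++ List.replicate fs.length 0, k)).1
    = pre ++ pvInterleave data k fs := by
  intro fs
  induction fs with
  | nil =>
    intro pre k hdrop hlen
    have h : (pre.length : Int) = (F.length : Int) := by exact_mod_cast by simpa using hlen
    rw [h, PySem.List.pyRange_one_eq_nil (by omega)]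
    simp [pvInterleave]
  | cons b fs ih =>
    intro pre k hdrop hlen
    have hlenN : pre.length + (fs.length + 1) = F.length := by simpa using hlen
    have hlt : (pre.length : Int) < (F.length : Int) := by exact_mod_cast by omega
    rw [PySem.List.pyRange_one_cons hlt, List.foldl_cons]
    have hget : PySem.List.pyGetD F (pre.length : Int) 0 = b := by
      rw [PySem.List.pyGetD_natCast]
      exact pvDrop_head F fs b pre.length hdrop
    by_cases hb : b = 1
    · have hset : PySem.List.pySetD (pre ++ List.replicate (b :: fs).length 0)
          ((pre.length : Nat) : Int) (0 : Int)
          = (pre ++ [(0 : Int)]) ++ List.replicate fs.length 0 := by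
        simp [List.replicate_succ]
      rw [show (PySem.List.pyGetD F ((pre.length : Nat) : Int) 0 == 1) = (b == 1) from by
        rw [hget], if_pos (by simp [hb])]
      simp only [hset]
      rw [show ((pre.length : Nat) : Int) + 1 = (((pre ++ [(0 : Int)]).length : Nat) : Int)
          from by simp,
        ih (pre ++ [(0 : Int)]) k
          (by simpa using pvDrop_tail F fs b pre.length hdrop)
          (by simp only [List.length_append, List.length_cons, List.length_nil]; omega)]
      simp [pvInterleave, hb]
    · have hset : PySem.List.pySetD (pre ++ List.replicate (b :: fs).length 0)
          ((pre.length : Nat) : Int) (PySem.List.pyGetD data k 0)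
          = (pre ++ [PySem.List.pyGetD data k 0]) ++ List.replicate fs.length 0 := by
        simp [List.replicate_succ]
      rw [show (PySem.List.pyGetD F ((pre.length : Nat) : Int) 0 == 1) = (b == 1) from by
        rw [hget], if_neg (by simp [hb])]
      simp only [hset]
      rw [show ((pre.length : Nat) : Int) + 1
            = (((pre ++ [PySem.List.pyGetD data k 0]).length : Nat) : Int) from by simp,
        ih (pre ++ [PySem.List.pyGetD data k 0]) (k + 1)
          (by simpa using pvDrop_tail F fs b pre.length hdrop)
          (by simp only [List.length_append, List.length_cons, List.length_nil]; omega)]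
      simp [pvInterleave, hb]

lemma pvLoopB (data : List Int) : ∀ (fs acc : List Int) (k : Nat),
    (fs.foldl
      (fun (s : List Int × List Int) (f : Int) =>
        if f == 1 then (s.1 ++ [(0 : Int)], s.2)
        else match PySem.List.pop? s.2 (-1) with
          | some (v, rest) => (s.1 ++ [v], rest)
          | none => (s.1 ++ [(0 : Int)], s.2))
      (acc, (data.drop k).reverse)).1
    = acc ++ pvInterleave data (k : Int) fs := by
  intro fs
  induction fs with
  | nil => intro acc k; simp [pvInterleave]
  | cons b fs ih =>
    intro acc k
    rw [List.foldl_cons]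
    by_cases hb : b = 1
    · rw [if_pos (by simp [hb]), ih (acc ++ [(0 : Int)]) k]
      simp [pvInterleave, hb]
    · rw [if_neg (by simp [hb])]
      cases h : data.drop k with
      | cons x rest =>
        have hpop : PySem.List.pop? ((x :: rest).reverse) (-1) = some (x, rest.reverse) := by
          rw [List.reverse_cons]
          exact PySem.List.pop?_last rest.reverse x
        simp only [hpop]
        have hrest : rest.reverse = (data.drop (k + 1)).reverse := by
          rw [pvDrop_tail data rest x k h]
        have hget : PySem.List.pyGetD data (k : Int) 0 = x := by
          rw [PySem.List.pyGetD_natCast]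
          exact pvDrop_head data rest x k h
        rw [hrest]
        have := ih (acc ++ [x]) (k + 1)
        push_cast at this
        rw [this]
        simp [pvInterleave, hb, hget]
      | nil =>
        have hpop : PySem.List.pop? (([] : List Int).reverse) (-1) = none := by decide
        simp only [hpop]
        have hk : data.length ≤ k := List.drop_eq_nil_iff.mp h
        have hget : PySem.List.pyGetD data (k : Int) 0 = 0 := by
          rw [PySem.List.pyGetD_natCast]
          simp [List.getD_eq_getElem?_getD, List.getElem?_eq_none hk]
        have hnext : data.drop (k + 1) = [] := List.drop_eq_nil_iff.mpr (by omega)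
        have := ih (acc ++ [(0 : Int)]) (k + 1)
        rw [hnext] at this
        simp only [List.reverse_nil] at this ⊢
        push_cast at this
        rw [this]
        simp [pvInterleave, hb, hget]

lemma pvA_eq (data F : List Int) : add_frozen_in_data data F = pvInterleave data 0 F := by
  have h := pvLoopA data F F [] 0 (by simp) (by simp)
  simpa [add_frozen_in_data] using h

lemma pvB_eq (data F : List Int) : add_frozen_in_data_alt data F = pvInterleave data 0 F := by
  have h := pvLoopB data F [] 0
  simp only [List.drop_zero, Nat.cast_zero] at h
  simpa [add_frozen_in_data_alt, PySem.List.slice?_none_none_neg_one] using h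

-- ===== VERDICT (by name: the statement is the Claim_ definition above) =====
theorem add_frozen_in_data_spec : Claim_equal_add_frozen_in_data := by
  intro data_in frozen_bits _ _
  unfold Spec_add_frozen_in_data
  rw [pvA_eq, pvB_eq]
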